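-- pv_equiv track=rewrite | github.com/shaiss/CodeSorcerer | audit_near/categories/blockchain_integration.py | _extract_near_patterns
-- ===== SOURCE A (Python) =====
-- from typing import Dict, List, Tuple
--
-- def _extract_near_patterns(files: List[Tuple[str, str]]) -> Dict:
--     """
--     Extract NEAR-specific integration patterns.
--
--     Args:
--         files: List of (file_path, file_content) tuples
--
--     Returns:
--         Dictionary containing information about NEAR integration patterns
--     """
--     patterns = {
--         "near_api_js": False,
--         "near_sdk_rs": False,
--         "near_sdk_as": False,
--         "wallet_integration": False,
--         "contract_calls": False,
--         "view_calls": False,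
--         "state_management": False,
--         "ft_integration": False,
--         "nft_integration": False,
--         "cross_contract_calls": False,
--     }
--
--     # Check for patterns in all files
--     for path, content in files:
--         content_lower = content.lower()
--
--         # Check for NEAR API JS
--         if "near-api-js" in content_lower or "@near-js" in content_lower:
--             patterns["near_api_js"] = True
--
--         # Check for NEAR SDK Rust
--         if "near-sdk" in content_lower and any(ext in path for ext in [".rs", ".toml"]):
--             patterns["near_sdk_rs"] = True
--
--         # Check for NEAR SDK AssemblyScript
--         if "near-sdk-as" in content_lower or "near-sdk-bindgen" in content_lower:
--             patterns["near_sdk_as"] = True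
--
--         # Check for wallet integration
--         if any(pattern in content_lower for pattern in [
--             "wallet.sign", "wallet.request", "connect.wallet", "wallet.account",
--             "walletconnect", "walletrequest", "signtransaction", "requestsign"
--         ]):
--             patterns["wallet_integration"] = True
--
--         # Check for contract calls
--         if any(pattern in content_lower for pattern in [
--             "near.call", "contract.call", "call(", ".callraw", "functioncall",
--             "near.functioncall", "contractcall"
--         ]):
--             patterns["contract_calls"] = True
--
--         # Check for view calls
--         if any(pattern in content_lower for pattern in [
--             "near.view", "contract.view", "view(", ".viewraw", "viewfunction",
--             "near.viewfunction", "contractview"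
--         ]):
--             patterns["view_calls"] = True
--
--         # Check for state management
--         if any(pattern in content_lower for pattern in [
--             "storagemana", "persistentstor", "storage.get", "storage.set",
--             "collections::", "treemap", "lookup", "storageusage"
--         ]):
--             patterns["state_management"] = True
--
--         # Check for fungible token integration
--         if any(pattern in content_lower for pattern in [
--             "ft_transfer", "ft_balance", "fungible_token", "ft.transfer", "ft_mint",
--             "nep141", "nep-141"
--         ]):
--             patterns["ft_integration"] = True
--
--         # Check for NFT integration
--         if any(pattern in content_lower for pattern in [
--             "nft_transfer", "nft_mint", "non_fungible_token", "nft.transfer",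
--             "nep171", "nep-171"
--         ]):
--             patterns["nft_integration"] = True
--
--         # Check for cross-contract calls
--         if any(pattern in content_lower for pattern in [
--             "promise", "ext_contract", "then(", "crosscontract", "cross_contract",
--             "callback", "after_transaction", "transaction_complete"
--         ]):
--             patterns["cross_contract_calls"] = True
--
--     return patterns
-- ===== SOURCE B (Python) =====
-- from typing import Dict, List, Tuple
--
-- # Table of purely content-based flags: flag name -> list of substrings (any match sets the flag).
-- _NEAR_PATTERN_TABLE = {
--     "near_api_js": ["near-api-js", "@near-js"],
--     "near_sdk_as": ["near-sdk-as", "near-sdk-bindgen"],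
--     "wallet_integration": ["wallet.sign", "wallet.request", "connect.wallet", "wallet.account",
--                            "walletconnect", "walletrequest", "signtransaction", "requestsign"],
--     "contract_calls": ["near.call", "contract.call", "call(", ".callraw", "functioncall",
--                        "near.functioncall", "contractcall"],
--     "view_calls": ["near.view", "contract.view", "view(", ".viewraw", "viewfunction",
--                    "near.viewfunction", "contractview"],
--     "state_management": ["storagemana", "persistentstor", "storage.get", "storage.set",
--                          "collections::", "treemap", "lookup", "storageusage"],
--     "ft_integration": ["ft_transfer", "ft_balance", "fungible_token", "ft.transfer", "ft_mint",
--                        "nep141", "nep-141"],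
--     "nft_integration": ["nft_transfer", "nft_mint", "non_fungible_token", "nft.transfer",
--                         "nep171", "nep-171"],
--     "cross_contract_calls": ["promise", "ext_contract", "then(", "crosscontract", "cross_contract",
--                              "callback", "after_transaction", "transaction_complete"],
-- }
--
-- _NEAR_KEY_ORDER = ["near_api_js", "near_sdk_rs", "near_sdk_as", "wallet_integration",
--                    "contract_calls", "view_calls", "state_management", "ft_integration",
--                    "nft_integration", "cross_contract_calls"]
--
--
-- def _extract_near_patterns(files: List[Tuple[str, str]]) -> Dict:
--     lowered = [(path, content.lower()) for path, content in files]
--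
--     def hit(name):
--         if name == "near_sdk_rs":
--             # path-conditioned flag: keyed on content AND file extension
--             return any("near-sdk" in cl and (".rs" in path or ".toml" in path)
--                        for path, cl in lowered)
--         pats = _NEAR_PATTERN_TABLE[name]
--         return any(p in cl for _, cl in lowered for p in pats)
--
--     return {name: hit(name) for name in _NEAR_KEY_ORDER}
-- ===== Notes on version B (the rewrite author's own statement) =====
-- stated objective: alternative
-- what changed: A's single pass over files with ten hand-written mutation branches on a flag dict is replaced by a flag-major scan: the eight-plus purely substring-based flags come from one name-to-substring-list table and each flag is computed as an any() over the pre-lowered files, with the path-conditioned near_sdk_rs flag as its own explicit check.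
import Mathlib
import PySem

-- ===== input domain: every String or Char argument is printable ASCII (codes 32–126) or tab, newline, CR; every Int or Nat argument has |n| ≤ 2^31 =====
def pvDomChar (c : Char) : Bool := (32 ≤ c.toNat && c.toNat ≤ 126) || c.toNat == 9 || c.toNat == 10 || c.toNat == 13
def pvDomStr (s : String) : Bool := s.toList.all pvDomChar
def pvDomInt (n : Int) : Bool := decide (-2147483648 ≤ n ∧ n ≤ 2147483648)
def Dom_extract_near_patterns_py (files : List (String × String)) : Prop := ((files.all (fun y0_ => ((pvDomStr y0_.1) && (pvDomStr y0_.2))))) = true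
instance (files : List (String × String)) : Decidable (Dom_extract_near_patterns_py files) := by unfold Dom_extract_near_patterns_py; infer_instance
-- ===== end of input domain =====

-- B replaces A's ten per-file mutation branches by a flag-name → substring-list table scanned flag-major; same return value (alternative decomposition, not faster).

-- ===== PORT A =====
-- A's dict of ten fixed Boolean flags is represented as a 10-tuple of Bools, updated per file in A's branch order.
def pvNearStep (st : Bool × Bool × Bool × Bool × Bool × Bool × Bool × Bool × Bool × Bool)
    (f : String × String) : Bool × Bool × Bool × Bool × Bool × Bool × Bool × Bool × Bool × Bool :=
  let path := f.1
  let cl := PySem.Str.lower f.2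
  let s1 := if PySem.Str.isIn "near-api-js" cl || PySem.Str.isIn "@near-js" cl then true else st.1
  let s2 := if PySem.Str.isIn "near-sdk" cl && ([".rs", ".toml"] : List String).any (fun ext => PySem.Str.isIn ext path) then true else st.2.1
  let s3 := if PySem.Str.isIn "near-sdk-as" cl || PySem.Str.isIn "near-sdk-bindgen" cl then true else st.2.2.1
  let s4 := if (["wallet.sign", "wallet.request", "connect.wallet", "wallet.account",
                 "walletconnect", "walletrequest", "signtransaction", "requestsign"] : List String).any
              (fun p => PySem.Str.isIn p cl) then true else st.2.2.2.1
  let s5 := if (["near.call", "contract.call", "call(", ".callraw", "functioncall",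
                 "near.functioncall", "contractcall"] : List String).any
              (fun p => PySem.Str.isIn p cl) then true else st.2.2.2.2.1
  let s6 := if (["near.view", "contract.view", "view(", ".viewraw", "viewfunction",
                 "near.viewfunction", "contractview"] : List String).any
              (fun p => PySem.Str.isIn p cl) then true else st.2.2.2.2.2.1
  let s7 := if (["storagemana", "persistentstor", "storage.get", "storage.set",
                 "collections::", "treemap", "lookup", "storageusage"] : List String).any
              (fun p => PySem.Str.isIn p cl) then true else st.2.2.2.2.2.2.1
  let s8 := if (["ft_transfer", "ft_balance", "fungible_token", "ft.transfer", "ft_mint",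
                 "nep141", "nep-141"] : List String).any
              (fun p => PySem.Str.isIn p cl) then true else st.2.2.2.2.2.2.2.1
  let s9 := if (["nft_transfer", "nft_mint", "non_fungible_token", "nft.transfer",
                 "nep171", "nep-171"] : List String).any
              (fun p => PySem.Str.isIn p cl) then true else st.2.2.2.2.2.2.2.2.1
  let s10 := if (["promise", "ext_contract", "then(", "crosscontract", "cross_contract",
                  "callback", "after_transaction", "transaction_complete"] : List String).any
               (fun p => PySem.Str.isIn p cl) then true else st.2.2.2.2.2.2.2.2.2
  (s1, s2, s3, s4, s5, s6, s7, s8, s9, s10)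

def extract_near_patterns_py (files : List (String × String)) : List (String × Bool) :=
  let st := files.foldl pvNearStep (false, false, false, false, false, false, false, false, false, false)
  [("near_api_js", st.1), ("near_sdk_rs", st.2.1), ("near_sdk_as", st.2.2.1),
   ("wallet_integration", st.2.2.2.1), ("contract_calls", st.2.2.2.2.1),
   ("view_calls", st.2.2.2.2.2.1), ("state_management", st.2.2.2.2.2.2.1),
   ("ft_integration", st.2.2.2.2.2.2.2.1), ("nft_integration", st.2.2.2.2.2.2.2.2.1),
   ("cross_contract_calls", st.2.2.2.2.2.2.2.2.2)]

-- ===== PORT B =====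
def pvNearTable : PySem.Dict String (List String) :=
  PySem.Dict.ofList [("near_api_js", ["near-api-js", "@near-js"]),
   ("near_sdk_as", ["near-sdk-as", "near-sdk-bindgen"]),
   ("wallet_integration", ["wallet.sign", "wallet.request", "connect.wallet", "wallet.account",
                           "walletconnect", "walletrequest", "signtransaction", "requestsign"]),
   ("contract_calls", ["near.call", "contract.call", "call(", ".callraw", "functioncall",
                       "near.functioncall", "contractcall"]),
   ("view_calls", ["near.view", "contract.view", "view(", ".viewraw", "viewfunction",
                   "near.viewfunction", "contractview"]),
   ("state_management", ["storagemana", "persistentstor", "storage.get", "storage.set",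
                         "collections::", "treemap", "lookup", "storageusage"]),
   ("ft_integration", ["ft_transfer", "ft_balance", "fungible_token", "ft.transfer", "ft_mint",
                       "nep141", "nep-141"]),
   ("nft_integration", ["nft_transfer", "nft_mint", "non_fungible_token", "nft.transfer",
                        "nep171", "nep-171"]),
   ("cross_contract_calls", ["promise", "ext_contract", "then(", "crosscontract", "cross_contract",
                             "callback", "after_transaction", "transaction_complete"])]

def pvNearKeyOrder : List String :=
  ["near_api_js", "near_sdk_rs", "near_sdk_as", "wallet_integration", "contract_calls",
   "view_calls", "state_management", "ft_integration", "nft_integration", "cross_contract_calls"]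

def extract_near_patterns_py_alt (files : List (String × String)) : List (String × Bool) :=
  let lowered := files.map (fun pc => (pc.1, PySem.Str.lower pc.2))
  let hit : String → Bool := fun name =>
    if name = "near_sdk_rs" then
      lowered.any (fun pc =>
        PySem.Str.isIn "near-sdk" pc.2 && (PySem.Str.isIn ".rs" pc.1 || PySem.Str.isIn ".toml" pc.1))
    else
      let pats := (PySem.Dict.get? pvNearTable name).getD []
      lowered.any (fun pc => pats.any (fun p => PySem.Str.isIn p pc.2))
  pvNearKeyOrder.map (fun name => (name, hit name))

-- ===== PRECONDITION & SPEC =====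
def Spec_extract_near_patterns_py (files : List (String × String)) (out : List (String × Bool)) : Prop := out = extract_near_patterns_py_alt files
instance (files : List (String × String)) (out : List (String × Bool)) : Decidable (Spec_extract_near_patterns_py files out) := by unfold Spec_extract_near_patterns_py; infer_instance

-- ===== CLAIM (what is proved, stated in full; the proofs are below) =====
def Claim_equal_extract_near_patterns_py : Prop := ∀ (files : List (String × String)), Dom_extract_near_patterns_py files → Spec_extract_near_patterns_py files (extract_near_patterns_py files)

-- ===== LEMMAS AND PROOFS =====

-- Per-flag trigger conditions of A's loop body (proof-only abbreviations of the branch tests).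
def pvC1 (f : String × String) : Bool := let cl := PySem.Str.lower f.2
  PySem.Str.isIn "near-api-js" cl || PySem.Str.isIn "@near-js" cl
def pvC2 (f : String × String) : Bool := let cl := PySem.Str.lower f.2
  PySem.Str.isIn "near-sdk" cl && ([".rs", ".toml"] : List String).any (fun ext => PySem.Str.isIn ext f.1)
def pvC3 (f : String × String) : Bool := let cl := PySem.Str.lower f.2
  PySem.Str.isIn "near-sdk-as" cl || PySem.Str.isIn "near-sdk-bindgen" cl
def pvC4 (f : String × String) : Bool := let cl := PySem.Str.lower f.2
  (["wallet.sign", "wallet.request", "connect.wallet", "wallet.account",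
    "walletconnect", "walletrequest", "signtransaction", "requestsign"] : List String).any
    (fun p => PySem.Str.isIn p cl)
def pvC5 (f : String × String) : Bool := let cl := PySem.Str.lower f.2
  (["near.call", "contract.call", "call(", ".callraw", "functioncall",
    "near.functioncall", "contractcall"] : List String).any (fun p => PySem.Str.isIn p cl)
def pvC6 (f : String × String) : Bool := let cl := PySem.Str.lower f.2
  (["near.view", "contract.view", "view(", ".viewraw", "viewfunction",
    "near.viewfunction", "contractview"] : List String).any (fun p => PySem.Str.isIn p cl)
def pvC7 (f : String × String) : Bool := let cl := PySem.Str.lower f.2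
  (["storagemana", "persistentstor", "storage.get", "storage.set",
    "collections::", "treemap", "lookup", "storageusage"] : List String).any (fun p => PySem.Str.isIn p cl)
def pvC8 (f : String × String) : Bool := let cl := PySem.Str.lower f.2
  (["ft_transfer", "ft_balance", "fungible_token", "ft.transfer", "ft_mint",
    "nep141", "nep-141"] : List String).any (fun p => PySem.Str.isIn p cl)
def pvC9 (f : String × String) : Bool := let cl := PySem.Str.lower f.2
  (["nft_transfer", "nft_mint", "non_fungible_token", "nft.transfer",
    "nep171", "nep-171"] : List String).any (fun p => PySem.Str.isIn p cl)
def pvC10 (f : String × String) : Bool := let cl := PySem.Str.lower f.2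
  (["promise", "ext_contract", "then(", "crosscontract", "cross_contract",
    "callback", "after_transaction", "transaction_complete"] : List String).any (fun p => PySem.Str.isIn p cl)

theorem pvIfOr (c b : Bool) : (if c = true then true else b) = (b || c) := by
  cases c <;> simp

theorem pvStep (st : Bool × Bool × Bool × Bool × Bool × Bool × Bool × Bool × Bool × Bool)
    (x : String × String) :
    pvNearStep st x =
      (st.1 || pvC1 x, st.2.1 || pvC2 x, st.2.2.1 || pvC3 x, st.2.2.2.1 || pvC4 x,
       st.2.2.2.2.1 || pvC5 x, st.2.2.2.2.2.1 || pvC6 x, st.2.2.2.2.2.2.1 || pvC7 x,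
       st.2.2.2.2.2.2.2.1 || pvC8 x, st.2.2.2.2.2.2.2.2.1 || pvC9 x,
       st.2.2.2.2.2.2.2.2.2 || pvC10 x) := by
  show (if pvC1 x = true then true else st.1,
        if pvC2 x = true then true else st.2.1,
        if pvC3 x = true then true else st.2.2.1,
        if pvC4 x = true then true else st.2.2.2.1,
        if pvC5 x = true then true else st.2.2.2.2.1,
        if pvC6 x = true then true else st.2.2.2.2.2.1,
        if pvC7 x = true then true else st.2.2.2.2.2.2.1,
        if pvC8 x = true then true else st.2.2.2.2.2.2.2.1,
        if pvC9 x = true then true else st.2.2.2.2.2.2.2.2.1,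
        if pvC10 x = true then true else st.2.2.2.2.2.2.2.2.2) = _
  rw [pvIfOr, pvIfOr, pvIfOr, pvIfOr, pvIfOr, pvIfOr, pvIfOr, pvIfOr, pvIfOr, pvIfOr]

theorem pvFold (files : List (String × String))
    (st : Bool × Bool × Bool × Bool × Bool × Bool × Bool × Bool × Bool × Bool) :
    files.foldl pvNearStep st =
      (st.1 || files.any pvC1, st.2.1 || files.any pvC2, st.2.2.1 || files.any pvC3,
       st.2.2.2.1 || files.any pvC4, st.2.2.2.2.1 || files.any pvC5,
       st.2.2.2.2.2.1 || files.any pvC6, st.2.2.2.2.2.2.1 || files.any pvC7,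
       st.2.2.2.2.2.2.2.1 || files.any pvC8, st.2.2.2.2.2.2.2.2.1 || files.any pvC9,
       st.2.2.2.2.2.2.2.2.2 || files.any pvC10) := by
  induction files generalizing st with
  | nil => simp
  | cons x xs ih =>
    rw [List.foldl_cons, pvStep, ih]
    simp only [List.any_cons, Bool.or_assoc]

-- ===== VERDICT (by name: the statement is the Claim_ definition above) =====
set_option maxHeartbeats 2000000 in
theorem extract_near_patterns_py_spec : Claim_equal_extract_near_patterns_py := by
  intro files _
  show extract_near_patterns_py files = extract_near_patterns_py_alt files
  have e1 : (PySem.Dict.get? pvNearTable "near_api_js") = some ["near-api-js", "@near-js"] := rfl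
  have e3 : (PySem.Dict.get? pvNearTable "near_sdk_as") = some ["near-sdk-as", "near-sdk-bindgen"] := rfl
  have e4 : (PySem.Dict.get? pvNearTable "wallet_integration") = some ["wallet.sign", "wallet.request",
      "connect.wallet", "wallet.account", "walletconnect", "walletrequest", "signtransaction", "requestsign"] := rfl
  have e5 : (PySem.Dict.get? pvNearTable "contract_calls") = some ["near.call", "contract.call", "call(",
      ".callraw", "functioncall", "near.functioncall", "contractcall"] := rfl
  have e6 : (PySem.Dict.get? pvNearTable "view_calls") = some ["near.view", "contract.view", "view(",
      ".viewraw", "viewfunction", "near.viewfunction", "contractview"] := rfl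
  have e7 : (PySem.Dict.get? pvNearTable "state_management") = some ["storagemana", "persistentstor",
      "storage.get", "storage.set", "collections::", "treemap", "lookup", "storageusage"] := rfl
  have e8 : (PySem.Dict.get? pvNearTable "ft_integration") = some ["ft_transfer", "ft_balance",
      "fungible_token", "ft.transfer", "ft_mint", "nep141", "nep-141"] := rfl
  have e9 : (PySem.Dict.get? pvNearTable "nft_integration") = some ["nft_transfer", "nft_mint",
      "non_fungible_token", "nft.transfer", "nep171", "nep-171"] := rfl
  have e10 : (PySem.Dict.get? pvNearTable "cross_contract_calls") = some ["promise", "ext_contract",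
      "then(", "crosscontract", "cross_contract", "callback", "after_transaction", "transaction_complete"] := rfl
  simp only [extract_near_patterns_py, extract_near_patterns_py_alt, pvFold, pvNearKeyOrder,
    List.map_cons, List.map_nil, String.reduceEq, reduceIte,
    e1, e3, e4, e5, e6, e7, e8, e9, e10, Option.getD_some,
    List.any_map, Function.comp_def, List.any_cons, List.any_nil, Bool.or_false, Bool.false_or]
  unfold pvC1 pvC2 pvC3 pvC4 pvC5 pvC6 pvC7 pvC8 pvC9 pvC10
  simp
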